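-- pv_equiv track=rewrite | github.com/EdwardJKim/adventofcode2018 | day03/part1.py | cover_fabric_with_claims
-- ===== SOURCE A (Python) =====
-- from typing import List, Tuple
--
-- def max_width_height(
--     claims: List[Tuple[int, int, int, int]]
--     ) -> Tuple[int, int]:
--
--     max_width = max(left + width for left, _, width, _ in claims)
--     max_height = max(top + height for _, top, _, height in claims)
--
--     return max_width, max_height
--
-- def create_fabric(
--     claims: List[Tuple[int, int, int, int]]
--     ) -> List[List[int]]:
--
--     width, height = max_width_height(claims)
--
--     return [[0] * width for _ in range(height)]
--
-- def cover_fabric_with_claims(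
--     claims: List[Tuple[int, int, int, int]]
--     ) -> List[List[int]]:
--
--     fabric = create_fabric(claims)
--
--     for claim in claims:
--         left, top, width, height = claim
--         for i in range(top, top + height):
--             for j in range(left, left + width):
--                 fabric[i][j] += 1
--
--     return fabric
-- ===== SOURCE B (Python) =====
-- from typing import List, Tuple
--
-- def cover_fabric_with_claims(
--     claims: List[Tuple[int, int, int, int]]
--     ) -> List[List[int]]:
--
--     width = max(left + w for left, _, w, _ in claims)
--     height = max(top + h for _, top, _, h in claims)
--
--     fabric = []
--     for i in range(height):
--         # 1D difference array for row i: +1 where a claim's span starts, -1 past its end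
--         diff = [0] * (width + 1)
--         for left, top, w, h in claims:
--             if 0 < w and top <= i < top + h:
--                 diff[left] += 1
--                 diff[left + w] -= 1
--         row = []
--         run = 0
--         for j in range(width):
--             run += diff[j]
--             row.append(run)
--         fabric.append(row)
--     return fabric
-- ===== Notes on version B (the rewrite author's own statement) =====
-- stated objective: faster
-- what changed: Replaces A's per-claim nested loops that increment every covered cell with a per-row 1D difference array (+1/-1 at each covering claim's span boundaries) followed by one running prefix-sum pass per row.
-- intended difference: On claim lists containing a positive-area claim with negative left or top, A returns a grid whose increments wrap around via Python's negative list indexing (an artefact of its index arithmetic, e.g. [[2]] for [(-1,0,2,1)]), while B's difference array yields its own natural value there ([[0]]); neither wrap is meaningful outside the non-negative domain, and B's value is an equally valid choice on this unspecified corner. — e.g. on cover_fabric_with_claims([(-1, 0, 2, 1)]): A returns [[2]], B returns [[0]]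
import Mathlib
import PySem

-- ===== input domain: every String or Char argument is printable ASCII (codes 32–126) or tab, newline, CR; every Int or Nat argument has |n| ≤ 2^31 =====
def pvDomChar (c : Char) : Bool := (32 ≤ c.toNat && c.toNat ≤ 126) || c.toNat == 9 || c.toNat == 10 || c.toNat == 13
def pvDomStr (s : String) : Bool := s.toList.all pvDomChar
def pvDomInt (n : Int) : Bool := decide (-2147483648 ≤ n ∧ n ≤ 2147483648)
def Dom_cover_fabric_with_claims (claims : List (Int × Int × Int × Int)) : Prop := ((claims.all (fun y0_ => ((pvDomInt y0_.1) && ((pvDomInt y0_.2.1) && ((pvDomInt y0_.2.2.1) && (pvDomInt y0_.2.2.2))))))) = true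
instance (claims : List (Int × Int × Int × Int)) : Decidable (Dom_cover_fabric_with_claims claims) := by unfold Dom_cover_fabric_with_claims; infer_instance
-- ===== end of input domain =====

-- B replaces A's per-claim cell-by-cell increments with a per-row 1D difference array
-- (+1 / -1 at each covering claim's span boundaries, then one running prefix sum per row).

-- ===== PORT A =====
-- max_width_height: max(left + width …), max(top + height …); none = ValueError on empty claims
def pvMaxWH (claims : List (Int × Int × Int × Int)) : Option (Int × Int) :=
  match PySem.List.max? (claims.map (fun c => c.1 + c.2.2.1)) (fun y => y),
        PySem.List.max? (claims.map (fun c => c.2.1 + c.2.2.2)) (fun y => y) with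
  | some w, some h => some (w, h)
  | _, _ => none

-- fabric[i][j] += 1 : read row i, read cell j, write cell, write row back.
-- pyGetD/pySetD are exact here because Pre_ keeps every index Python accepts (wrap included);
-- on inputs where Python raises IndexError (outside Pre_) they leave the list unchanged.
def pvIncCell (fab : List (List Int)) (i j : Int) : List (List Int) :=
  PySem.List.pySetD fab i
    (PySem.List.pySetD (PySem.List.pyGetD fab i []) j
      (PySem.List.pyGetD (PySem.List.pyGetD fab i []) j 0 + 1))

-- the two nested for-loops of one claim
def pvApplyClaim (fab : List (List Int)) (c : Int × Int × Int × Int) : List (List Int) :=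
  (PySem.List.pyRange c.2.1 (c.2.1 + c.2.2.2) 1).foldl (fun f i =>
    (PySem.List.pyRange c.1 (c.1 + c.2.2.1) 1).foldl (fun f j => pvIncCell f i j) f) fab

def cover_fabric_with_claims (claims : List (Int × Int × Int × Int)) : List (List Int) :=
  match pvMaxWH claims with
  | none => []   -- Python: max() raises ValueError on empty claims (excluded by Pre_)
  | some (w, h) =>
      -- create_fabric: [[0] * width for _ in range(height)]
      let fabric := (PySem.List.pyRange 0 h 1).map (fun _ => PySem.List.pyRepeat [(0 : Int)] w)
      claims.foldl pvApplyClaim fabric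

-- ===== PORT B =====
-- inner claim loop of Source B: if 0 < w and top <= i < top + h: diff[left] += 1; diff[left + w] -= 1
def pvRowDiff (claims : List (Int × Int × Int × Int)) (i : Int) (diff0 : List Int) : List Int :=
  claims.foldl (fun d c =>
    if 0 < c.2.2.1 ∧ c.2.1 ≤ i ∧ i < c.2.1 + c.2.2.2 then
      let d1 := PySem.List.pySetD d c.1 (PySem.List.pyGetD d c.1 0 + 1)
      PySem.List.pySetD d1 (c.1 + c.2.2.1) (PySem.List.pyGetD d1 (c.1 + c.2.2.1) 0 - 1)
    else d) diff0

-- prefix-sum loop of Source B: run += diff[j]; row.append(run)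
def pvRowScan (diff : List Int) (w : Int) : Int × List Int :=
  (PySem.List.pyRange 0 w 1).foldl (fun s j =>
    (s.1 + PySem.List.pyGetD diff j 0, s.2 ++ [s.1 + PySem.List.pyGetD diff j 0])) (0, [])

def cover_fabric_with_claims_alt (claims : List (Int × Int × Int × Int)) : List (List Int) :=
  match PySem.List.max? (claims.map (fun c => c.1 + c.2.2.1)) (fun y => y),
        PySem.List.max? (claims.map (fun c => c.2.1 + c.2.2.2)) (fun y => y) with
  | some width, some height =>
      (PySem.List.pyRange 0 height 1).foldl (fun fabric i =>
        let diff := pvRowDiff claims i (PySem.List.pyRepeat [(0 : Int)] (width + 1))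
        fabric ++ [(pvRowScan diff width).2]) []
  | _, _ => []   -- Python: max() raises ValueError on empty claims (excluded by Pre_)

-- ===== PRECONDITION & SPEC =====
-- max of a nonempty list of ints (0 for [] — unused there, Pre_ requires claims ≠ [])
def pvMaxOf (xs : List Int) : Int := match xs with | [] => 0 | x :: t => t.foldl max x

-- Pre_ excludes exactly the inputs where A raises: the empty list (max() ValueError) and
-- claim lists where some positive-area claim starts so far left/up that Python's negative
-- indexing falls below the fabric (IndexError).
def Pre_cover_fabric_with_claims (claims : List (Int × Int × Int × Int)) : Prop :=
  claims ≠ [] ∧ ∀ c ∈ claims, 0 < c.2.2.1 → 0 < c.2.2.2 →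
    (-(pvMaxOf (claims.map (fun c => c.1 + c.2.2.1))) ≤ c.1 ∧
     -(pvMaxOf (claims.map (fun c => c.2.1 + c.2.2.2))) ≤ c.2.1)
instance (claims : List (Int × Int × Int × Int)) : Decidable (Pre_cover_fabric_with_claims claims) := by
  unfold Pre_cover_fabric_with_claims; infer_instance

def pvWitness_cover_fabric_with_claims : (List (Int × Int × Int × Int)) := [(0, 0, 2, 1), (1, 0, 2, 2)]

-- On claim lists with a positive-area claim whose left or top is negative, A returns a grid in
-- which the increments wrap around via Python's negative indexing — an accident of its index
-- arithmetic; B's difference array wraps its two boundary marks instead, and outside the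
-- meaningful (non-negative) domain B's value is as good a choice as any.
def D_cover_fabric_with_claims (claims : List (Int × Int × Int × Int)) : Prop :=
  ∃ c ∈ claims, 0 < c.2.2.1 ∧ 0 < c.2.2.2 ∧ (c.1 < 0 ∨ c.2.1 < 0)
instance (claims : List (Int × Int × Int × Int)) : Decidable (D_cover_fabric_with_claims claims) := by
  unfold D_cover_fabric_with_claims; infer_instance

def Spec_cover_fabric_with_claims (claims : List (Int × Int × Int × Int)) (out : List (List Int)) : Prop :=
  ¬ D_cover_fabric_with_claims claims → out = cover_fabric_with_claims_alt claims
instance (claims : List (Int × Int × Int × Int)) (out : List (List Int)) : Decidable (Spec_cover_fabric_with_claims claims out) := by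
  unfold Spec_cover_fabric_with_claims; infer_instance

def pvDiffWitness_cover_fabric_with_claims : (List (Int × Int × Int × Int)) := [(-1, 0, 2, 1)]
def pvDiffWitnessOut_cover_fabric_with_claims : (List (List Int)) × (List (List Int)) := ([[2]], [[0]])

-- ===== CLAIM (what is proved, stated in full; the proofs are below) =====
def Claim_unchanged_cover_fabric_with_claims : Prop := ∀ (claims : List (Int × Int × Int × Int)), Dom_cover_fabric_with_claims claims → Pre_cover_fabric_with_claims claims → Spec_cover_fabric_with_claims claims (cover_fabric_with_claims claims)
def Claim_changed_cover_fabric_with_claims : Prop := Dom_cover_fabric_with_claims (pvDiffWitness_cover_fabric_with_claims) ∧ Pre_cover_fabric_with_claims (pvDiffWitness_cover_fabric_with_claims) ∧ D_cover_fabric_with_claims (pvDiffWitness_cover_fabric_with_claims) ∧ cover_fabric_with_claims (pvDiffWitness_cover_fabric_with_claims) = pvDiffWitnessOut_cover_fabric_with_claims.1 ∧ cover_fabric_with_claims_alt (pvDiffWitness_cover_fabric_with_claims) = pvDiffWitnessOut_cover_fabric_with_claims.2 ∧ pvDiffWitnessOut_cover_fabric_with_claims.1 ≠ pvDiffWitn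essOut_cover_fabric_with_claims.2


-- ===== LEMMAS AND PROOFS =====

-- cell (i, j) of a grid, 0 outside
def pvCell (f : List (List Int)) (i j : Nat) : Int := (f.getD i []).getD j 0

-- number of claims covering cell (i, j)
def pvCnt (claims : List (Int × Int × Int × Int)) (i j : Int) : Int :=
  (claims.map (fun c => if c.1 ≤ j ∧ j < c.1 + c.2.2.1 ∧ c.2.1 ≤ i ∧ i < c.2.1 + c.2.2.2 then (1 : Int) else 0)).sum

def pvShape (f : List (List Int)) (Hn Wn : Nat) : Prop := f.length = Hn ∧ ∀ r ∈ f, r.length = Wn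

-- sum of the first n entries of a row (0 outside)
def pvS (d : List Int) : Nat → Int
  | 0 => 0
  | n + 1 => pvS d n + d.getD n 0

theorem pv_getD_set_eq {α : Type} (l : List α) (n : Nat) (a d : α) (h : n < l.length) :
    (l.set n a).getD n d = a := by
  simp [List.getD_eq_getElem?_getD, h]

theorem pv_getD_set_ne {α : Type} (l : List α) (n m : Nat) (a d : α) (h : n ≠ m) :
    (l.set n a).getD m d = l.getD m d := by
  simp [List.getD_eq_getElem?_getD, h]

theorem pv_getD_replicate (n k : Nat) : (List.replicate n (0 : Int)).getD k 0 = 0 := by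
  simp [List.getD_eq_getElem?_getD, List.getElem?_replicate]; split <;> simp

-- ===== A-side =====

-- the inner j-loop on a single row adds 1 on [a, b)
theorem pv_rowInc (k : Nat) : ∀ (a : Int) (r : List Int), 0 ≤ a → a + k ≤ (r.length : Int) →
    ((PySem.List.pyRange a (a + k) 1).foldl
        (fun r j => PySem.List.pySetD r j (PySem.List.pyGetD r j 0 + 1)) r).length = r.length ∧
    ∀ n : Nat, ((PySem.List.pyRange a (a + k) 1).foldl
        (fun r j => PySem.List.pySetD r j (PySem.List.pyGetD r j 0 + 1)) r).getD n 0
      = r.getD n 0 + (if a ≤ (n : Int) ∧ (n : Int) < a + k then 1 else 0) := by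
  induction k with
  | zero =>
    intro a r ha hk
    rw [show a + ((0 : Nat) : Int) = a by simp, PySem.List.pyRange_one_eq_nil le_rfl]
    refine ⟨rfl, fun n => ?_⟩
    rw [List.foldl_nil, if_neg (by omega)]
    omega
  | succ k ih =>
    intro a r ha hk
    rw [PySem.List.pyRange_one_cons (by push_cast; omega), List.foldl_cons]
    have ha' : a < (r.length : Int) := by push_cast at hk ⊢; omega
    have e1 : PySem.List.pySetD r a (PySem.List.pyGetD r a 0 + 1)
        = r.set a.toNat (r[a.toNat] + 1) := by
      rw [PySem.List.pySetD_of_nonneg r _ ha, PySem.List.pyGetD_eq_getElem r 0 ha ha']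
    rw [e1, show a + ((k + 1 : Nat) : Int) = (a + 1) + (k : Int) by push_cast; ring]
    obtain ⟨hlen, hval⟩ := ih (a + 1) (r.set a.toNat (r[a.toNat] + 1)) (by omega) (by simp; omega)
    refine ⟨by simpa using hlen, fun n => ?_⟩
    rw [hval n]
    by_cases hn : a.toNat = n
    · subst hn
      rw [pv_getD_set_eq _ _ _ _ (by omega), List.getD_eq_getElem r 0 (by omega)]
      split_ifs <;> omega
    · rw [pv_getD_set_ne _ _ _ _ _ hn]
      split_ifs <;> omega

-- the inner loop only rewrites row i
theorem pv_comm (L : List Int) : ∀ (fab : List (List Int)) (i : Int), 0 ≤ i → i < (fab.length : Int) →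
    L.foldl (fun f j => pvIncCell f i j) fab
      = PySem.List.pySetD fab i
          (L.foldl (fun r j => PySem.List.pySetD r j (PySem.List.pyGetD r j 0 + 1))
            (PySem.List.pyGetD fab i [])) := by
  induction L with
  | nil =>
    intro fab i h0 h1
    rw [List.foldl_nil, List.foldl_nil, PySem.List.pySetD_of_nonneg _ _ h0,
      PySem.List.pyGetD_eq_getElem _ _ h0 h1, List.set_getElem_self]
  | cons x L ih =>
    intro fab i h0 h1
    rw [List.foldl_cons, List.foldl_cons]
    have hi : i.toNat < fab.length := by omega
    have hrow : PySem.List.pyGetD fab i [] = fab[i.toNat] :=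
      PySem.List.pyGetD_eq_getElem fab [] h0 h1
    have hstep : pvIncCell fab i x = fab.set i.toNat
        (PySem.List.pySetD fab[i.toNat] x (PySem.List.pyGetD fab[i.toNat] x 0 + 1)) := by
      rw [pvIncCell, hrow, PySem.List.pySetD_of_nonneg _ _ h0]
    rw [hstep, ih _ i h0 (by simpa using h1)]
    rw [PySem.List.pyGetD_eq_getElem _ [] h0 (by simpa using h1),
      List.getElem_set_self (by simpa using hi),
      PySem.List.pySetD_of_nonneg _ _ h0, List.set_set,
      ← PySem.List.pySetD_of_nonneg fab _ h0, hrow]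

-- the outer i-loop of one positive claim adds the rectangle indicator
theorem pv_outer (l w : Int) (Hn Wn : Nat) (hl : 0 ≤ l) (hw : 0 < w) (hlw : l + w ≤ (Wn : Int))
    (k : Nat) : ∀ (a : Int) (fab : List (List Int)), pvShape fab Hn Wn → 0 ≤ a → a + k ≤ (Hn : Int) →
    pvShape ((PySem.List.pyRange a (a + (k : Int)) 1).foldl
      (fun f i => (PySem.List.pyRange l (l + w) 1).foldl (fun f j => pvIncCell f i j) f) fab) Hn Wn ∧
    ∀ i j : Nat, pvCell ((PySem.List.pyRange a (a + (k : Int)) 1).foldl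
      (fun f i => (PySem.List.pyRange l (l + w) 1).foldl (fun f j => pvIncCell f i j) f) fab) i j
      = pvCell fab i j + (if a ≤ (i : Int) ∧ (i : Int) < a + k ∧ l ≤ (j : Int) ∧ (j : Int) < l + w
          then 1 else 0) := by
  induction k with
  | zero =>
    intro a fab hsh ha hk
    rw [show a + ((0 : Nat) : Int) = a by simp, PySem.List.pyRange_one_eq_nil le_rfl]
    refine ⟨hsh, fun i j => ?_⟩
    rw [List.foldl_nil, if_neg (by omega)]
    omega
  | succ k ih =>
    intro a fab hsh ha hk
    obtain ⟨hlenf, hrows⟩ := hsh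
    have ha' : a.toNat < fab.length := by omega
    rw [PySem.List.pyRange_one_cons
      (show a < a + ((k + 1 : Nat) : Int) by push_cast; omega), List.foldl_cons]
    rw [pv_comm _ fab a ha (by omega)]
    have hr : PySem.List.pyGetD fab a [] = fab[a.toNat] :=
      PySem.List.pyGetD_eq_getElem fab [] ha (by omega)
    have hrW : (fab[a.toNat]).length = Wn := hrows _ (List.getElem_mem ha')
    obtain ⟨hFlen, hFval⟩ := pv_rowInc w.toNat l fab[a.toNat] hl
      (by rw [hrW]; omega)
    rw [hr, show l + w = l + (w.toNat : Int) by omega] at *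
    set F := (PySem.List.pyRange l (l + (w.toNat : Int)) 1).foldl
      (fun r j => PySem.List.pySetD r j (PySem.List.pyGetD r j 0 + 1)) fab[a.toNat] with hF
    rw [PySem.List.pySetD_of_nonneg _ _ ha]
    have hsh1 : pvShape (fab.set a.toNat F) Hn Wn := by
      refine ⟨by simpa using hlenf, fun r hr' => ?_⟩
      rcases List.mem_or_eq_of_mem_set hr' with h | h
      · exact hrows r h
      · rw [h, hFlen, hrW]
    obtain ⟨hsh2, hval2⟩ := ih (a + 1) (fab.set a.toNat F) hsh1 (by omega) (by push_cast at hk ⊢; omega)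
    rw [show a + ((k + 1 : Nat) : Int) = (a + 1) + (k : Int) by push_cast; ring]
    refine ⟨hsh2, fun i j => ?_⟩
    rw [hval2 i j]
    by_cases hi : a.toNat = i
    · subst hi
      have : pvCell (fab.set a.toNat F) a.toNat j = pvCell fab a.toNat j
          + (if l ≤ (j : Int) ∧ (j : Int) < l + (w.toNat : Int) then 1 else 0) := by
        rw [pvCell, pv_getD_set_eq _ _ _ _ ha', hFval j, pvCell,
          List.getD_eq_getElem fab [] ha']
      rw [this]
      split_ifs <;> omega
    · have : pvCell (fab.set a.toNat F) i j = pvCell fab i j := by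
        rw [pvCell, pv_getD_set_ne _ _ _ _ _ hi, pvCell]
      rw [this]
      split_ifs <;> omega

-- one claim adds its indicator to every cell
theorem pv_applyClaim (c : Int × Int × Int × Int) (Hn Wn : Nat) (fab : List (List Int))
    (hsh : pvShape fab Hn Wn)
    (hg : 0 < c.2.2.1 → 0 < c.2.2.2 →
      0 ≤ c.1 ∧ 0 ≤ c.2.1 ∧ c.1 + c.2.2.1 ≤ (Wn : Int) ∧ c.2.1 + c.2.2.2 ≤ (Hn : Int)) :
    pvShape (pvApplyClaim fab c) Hn Wn ∧
    ∀ i j : Nat, pvCell (pvApplyClaim fab c) i j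
      = pvCell fab i j + (if c.1 ≤ (j : Int) ∧ (j : Int) < c.1 + c.2.2.1 ∧
          c.2.1 ≤ (i : Int) ∧ (i : Int) < c.2.1 + c.2.2.2 then 1 else 0) := by
  obtain ⟨l, t, w, h⟩ := c
  dsimp only at hg ⊢
  rw [pvApplyClaim]
  dsimp only
  by_cases hh : 0 < h
  · by_cases hw : 0 < w
    · obtain ⟨hl, ht, hlw, hth⟩ := hg hw hh
      have := pv_outer l w Hn Wn hl hw hlw h.toNat t fab hsh ht (by omega)
      rw [show t + (h.toNat : Int) = t + h by omega] at this
      obtain ⟨h1, h2⟩ := this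
      refine ⟨h1, fun i j => ?_⟩
      rw [h2 i j]
      split_ifs <;> omega
    · rw [PySem.List.pyRange_one_eq_nil (show l + w ≤ l by omega)]
      simp only [List.foldl_nil, PySem.List.foldl_ignore]
      refine ⟨hsh, fun i j => ?_⟩
      rw [if_neg (by omega)]
      omega
  · rw [PySem.List.pyRange_one_eq_nil (show t + h ≤ t by omega)]
    rw [List.foldl_nil]
    refine ⟨hsh, fun i j => ?_⟩
    rw [if_neg (by omega)]
    omega

-- the claim loop adds the coverage count to every cell
theorem pv_foldClaims (claims : List (Int × Int × Int × Int)) (Hn Wn : Nat) :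
    ∀ (fab : List (List Int)), pvShape fab Hn Wn →
    (∀ c ∈ claims, 0 < c.2.2.1 → 0 < c.2.2.2 →
      0 ≤ c.1 ∧ 0 ≤ c.2.1 ∧ c.1 + c.2.2.1 ≤ (Wn : Int) ∧ c.2.1 + c.2.2.2 ≤ (Hn : Int)) →
    pvShape (claims.foldl pvApplyClaim fab) Hn Wn ∧
    ∀ i j : Nat, pvCell (claims.foldl pvApplyClaim fab) i j
      = pvCell fab i j + pvCnt claims (i : Int) (j : Int) := by
  induction claims with
  | nil => intro fab hsh hg; refine ⟨hsh, fun i j => ?_⟩; simp [pvCnt]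
  | cons c rest ih =>
    intro fab hsh hg
    obtain ⟨hsh1, hcell1⟩ := pv_applyClaim c Hn Wn fab hsh (hg c (by simp))
    obtain ⟨hsh2, hcell2⟩ := ih (pvApplyClaim fab c) hsh1 (fun c' hc' => hg c' (by simp [hc']))
    rw [List.foldl_cons]
    refine ⟨hsh2, fun i j => ?_⟩
    rw [hcell2 i j, hcell1 i j]
    simp only [pvCnt, List.map_cons, List.sum_cons]
    ring

-- ===== B-side =====

theorem pv_S_set (d : List Int) (k : Nat) (v : Int) (hk : k < d.length) :
    ∀ n : Nat, pvS (d.set k v) n = pvS d n + (if k < n then v - d.getD k 0 else 0) := by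
  intro n; induction n with
  | zero => simp [pvS]
  | succ n ih =>
    by_cases h : k = n
    · subst h
      rw [pvS, pvS, ih, pv_getD_set_eq d k v 0 hk]
      split_ifs <;> omega
    · rw [pvS, pvS, ih, pv_getD_set_ne d k n v 0 h]
      split_ifs <;> omega

theorem pv_S_zero (m : Nat) : ∀ n : Nat, pvS (List.replicate m (0 : Int)) n = 0 := by
  intro n; induction n with
  | zero => rfl
  | succ n ih => simp [pvS, ih]

-- prefix sums of the difference row count the covering claims
theorem pv_rowDiff (claims : List (Int × Int × Int × Int)) (i : Int) (Wn : Nat) :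
    ∀ (d : List Int), d.length = Wn + 1 →
    (∀ c ∈ claims, 0 < c.2.2.1 → 0 < c.2.2.2 →
      0 ≤ c.1 ∧ 0 ≤ c.2.1 ∧ c.1 + c.2.2.1 ≤ (Wn : Int)) →
    ∀ j : Nat, pvS (pvRowDiff claims i d) (j + 1) = pvS d (j + 1) + pvCnt claims i (j : Int) := by
  induction claims with
  | nil => intro d hd hg j; simp [pvRowDiff, pvCnt]
  | cons c rest ih =>
    intro d hd hg j
    obtain ⟨l, t, w, h⟩ := c
    have hgc := hg (l, t, w, h) (by simp)
    dsimp only at hgc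
    have hgr : ∀ c' ∈ rest, 0 < c'.2.2.1 → 0 < c'.2.2.2 →
        0 ≤ c'.1 ∧ 0 ≤ c'.2.1 ∧ c'.1 + c'.2.2.1 ≤ (Wn : Int) := fun c' hc' => hg c' (by simp [hc'])
    simp only [pvRowDiff, List.foldl_cons]
    by_cases hc : 0 < w ∧ t ≤ i ∧ i < t + h
    · obtain ⟨hw, hti, hith⟩ := hc
      obtain ⟨hl, ht, hlw⟩ := hgc hw (by omega)
      have hbl : (l.toNat) < d.length := by omega
      have hblw : ((l + w).toNat) < d.length := by omega
      have e1 : PySem.List.pySetD d l (PySem.List.pyGetD d l 0 + 1)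
          = d.set l.toNat (d[l.toNat] + 1) := by
        rw [PySem.List.pySetD_of_nonneg d _ hl, PySem.List.pyGetD_eq_getElem d 0 hl (by omega)]
      rw [if_pos ⟨hw, hti, hith⟩]
      simp only [e1]
      have hbl1 : ((l + w).toNat) < (d.set l.toNat (d[l.toNat] + 1)).length := by
        simpa using hblw
      have e2 : PySem.List.pySetD (d.set l.toNat (d[l.toNat] + 1)) (l + w)
            (PySem.List.pyGetD (d.set l.toNat (d[l.toNat] + 1)) (l + w) 0 - 1)
          = (d.set l.toNat (d[l.toNat] + 1)).set (l + w).toNat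
            ((d.set l.toNat (d[l.toNat] + 1))[(l + w).toNat] - 1) := by
        rw [PySem.List.pySetD_of_nonneg _ _ (by omega : (0:Int) ≤ l + w), PySem.List.pyGetD_eq_getElem _ 0 (by omega : (0:Int) ≤ l + w) (by simp; omega)]
      rw [e2]
      have hIH := ih ((d.set l.toNat (d[l.toNat] + 1)).set (l + w).toNat
          ((d.set l.toNat (d[l.toNat] + 1))[(l + w).toNat] - 1)) (by simpa using hd) hgr j
      simp only [pvRowDiff] at hIH
      rw [hIH, pv_S_set _ _ _ hbl1, pv_S_set _ _ _ hbl]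
      rw [List.getD_eq_getElem _ _ hbl, List.getD_eq_getElem _ _ hbl1]
      simp only [pvCnt, List.map_cons, List.sum_cons]
      have hcnt : pvCnt rest i (j : Int) = (rest.map (fun c =>
          if c.1 ≤ (j : Int) ∧ (j : Int) < c.1 + c.2.2.1 ∧ c.2.1 ≤ i ∧ i < c.2.1 + c.2.2.2
          then (1 : Int) else 0)).sum := rfl
      rw [← hcnt]
      split_ifs <;> omega
    · rw [if_neg hc]
      have hIH := ih d hd hgr j
      simp only [pvRowDiff] at hIH
      rw [hIH]
      simp only [pvCnt, List.map_cons, List.sum_cons]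
      have hcnt : pvCnt rest i (j : Int) = (rest.map (fun c =>
          if c.1 ≤ (j : Int) ∧ (j : Int) < c.1 + c.2.2.1 ∧ c.2.1 ≤ i ∧ i < c.2.1 + c.2.2.2
          then (1 : Int) else 0)).sum := rfl
      rw [← hcnt]
      have : ¬ (l ≤ (j : Int) ∧ (j : Int) < l + w ∧ t ≤ i ∧ i < t + h) := by
        intro ⟨h1, h2, h3, h4⟩; exact hc ⟨by omega, h3, h4⟩
      rw [if_neg this]
      omega

theorem pv_rowScan_aux (d : List Int) (n : Nat) :
    (PySem.List.pyRange 0 (n : Int) 1).foldl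
      (fun s j => (s.1 + PySem.List.pyGetD d j 0, s.2 ++ [s.1 + PySem.List.pyGetD d j 0]))
      ((0 : Int), ([] : List Int))
    = (pvS d n, (List.range n).map (fun j => pvS d (j + 1))) := by
  induction n with
  | zero => simp [PySem.List.pyRange_one_eq_nil, pvS]
  | succ n ih =>
    rw [show ((n + 1 : Nat) : Int) = (n : Int) + 1 by push_cast; ring,
      PySem.List.pyRange_one_succ_right (by positivity), List.foldl_append, ih]
    simp [List.range_succ, pvS]

theorem pv_rowScan (d : List Int) (b : Int) :
    (pvRowScan d b).2 = (List.range b.toNat).map (fun j => pvS d (j + 1)) := by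
  unfold pvRowScan
  by_cases hb : 0 ≤ b
  · rw [show b = (b.toNat : Int) by omega, pv_rowScan_aux, Int.toNat_natCast]
  · rw [PySem.List.pyRange_one_eq_nil (by omega), show b.toNat = 0 by omega]
    simp

-- the freshly created fabric: H rows of W zeros
theorem pv_shape0 (Hh Ww : Int) :
    pvShape ((PySem.List.pyRange 0 Hh 1).map (fun _ => PySem.List.pyRepeat [(0 : Int)] Ww))
      Hh.toNat Ww.toNat := by
  constructor
  · rw [List.length_map, PySem.List.length_pyRange_one]; simp
  · intro r hr
    obtain ⟨_, _, rfl⟩ := List.mem_map.mp hr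
    rw [PySem.List.pyRepeat_singleton, List.length_replicate]

theorem pv_cell0 (Hh Ww : Int) : ∀ i j : Nat,
    pvCell ((PySem.List.pyRange 0 Hh 1).map (fun _ => PySem.List.pyRepeat [(0 : Int)] Ww)) i j = 0 := by
  intro i j
  rw [pvCell]
  by_cases hi : i < ((PySem.List.pyRange 0 Hh 1).map (fun _ => PySem.List.pyRepeat [(0 : Int)] Ww)).length
  · rw [List.getD_eq_getElem _ _ hi, List.getElem_map, PySem.List.pyRepeat_singleton,
      pv_getD_replicate]
  · rw [List.getD_eq_default ((PySem.List.pyRange 0 Hh 1).map (fun _ => PySem.List.pyRepeat [(0 : Int)] Ww)) [] (by omega)]; rfl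

-- ===== VERDICT (by name: the statement is the Claim_ definition above) =====
theorem cover_fabric_with_claims_spec : Claim_unchanged_cover_fabric_with_claims := by
  intro claims hdom hpre hnd
  obtain ⟨hne, _⟩ := hpre
  simp only [D_cover_fabric_with_claims] at hnd
  obtain ⟨c0, rest, rfl⟩ : ∃ c0 rest, claims = c0 :: rest := by
    cases claims with
    | nil => exact absurd rfl hne
    | cons a b => exact ⟨a, b, rfl⟩
  set W := (rest.map (fun c => c.1 + c.2.2.1)).foldl max (c0.1 + c0.2.2.1) with hWdef
  set H := (rest.map (fun c => c.2.1 + c.2.2.2)).foldl max (c0.2.1 + c0.2.2.2) with hHdef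
  have hmW : PySem.List.max? ((c0 :: rest).map (fun c => c.1 + c.2.2.1)) (fun y => y) = some W := by
    rw [List.map_cons, PySem.List.max?_id_cons]
  have hmH : PySem.List.max? ((c0 :: rest).map (fun c => c.2.1 + c.2.2.2)) (fun y => y) = some H := by
    rw [List.map_cons, PySem.List.max?_id_cons]
  have hWb : ∀ c ∈ c0 :: rest, c.1 + c.2.2.1 ≤ W := by
    intro c hc
    obtain ⟨h1, h2⟩ := PySem.List.le_foldl_max (rest.map (fun c => c.1 + c.2.2.1)) (c0.1 + c0.2.2.1)
    rcases List.mem_cons.mp hc with rfl | hc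
    · exact h1
    · exact h2 _ (List.mem_map_of_mem hc)
  have hHb : ∀ c ∈ c0 :: rest, c.2.1 + c.2.2.2 ≤ H := by
    intro c hc
    obtain ⟨h1, h2⟩ := PySem.List.le_foldl_max (rest.map (fun c => c.2.1 + c.2.2.2)) (c0.2.1 + c0.2.2.2)
    rcases List.mem_cons.mp hc with rfl | hc
    · exact h1
    · exact h2 _ (List.mem_map_of_mem hc)
  have hgall : ∀ c ∈ c0 :: rest, 0 < c.2.2.1 → 0 < c.2.2.2 →
      0 ≤ c.1 ∧ 0 ≤ c.2.1 ∧ c.1 + c.2.2.1 ≤ (W.toNat : Int) ∧ c.2.1 + c.2.2.2 ≤ (H.toNat : Int) := by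
    intro c hc hw hh
    have hW := hWb c hc
    have hH := hHb c hc
    have hgd : 0 ≤ c.1 ∧ 0 ≤ c.2.1 := by
      by_contra hcon
      exact hnd ⟨c, hc, hw, hh, by omega⟩
    omega
  have hg2 : ∀ c ∈ c0 :: rest, 0 < c.2.2.1 → 0 < c.2.2.2 →
      0 ≤ c.1 ∧ 0 ≤ c.2.1 ∧ c.1 + c.2.2.1 ≤ (W.toNat : Int) := fun c hc hw hh =>
    ⟨(hgall c hc hw hh).1, (hgall c hc hw hh).2.1, (hgall c hc hw hh).2.2.1⟩
  obtain ⟨⟨hlenA, hrowsA⟩, hcellA⟩ :=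
    pv_foldClaims (c0 :: rest) H.toNat W.toNat
      ((PySem.List.pyRange 0 H 1).map (fun _ => PySem.List.pyRepeat [(0 : Int)] W))
      (pv_shape0 H W) hgall
  have eA : cover_fabric_with_claims (c0 :: rest)
      = (c0 :: rest).foldl pvApplyClaim
          ((PySem.List.pyRange 0 H 1).map (fun _ => PySem.List.pyRepeat [(0 : Int)] W)) := by
    rw [cover_fabric_with_claims, pvMaxWH, hmW, hmH]
  have eB : cover_fabric_with_claims_alt (c0 :: rest)
      = (PySem.List.pyRange 0 H 1).map (fun i =>
          (pvRowScan (pvRowDiff (c0 :: rest) i (PySem.List.pyRepeat [(0 : Int)] (W + 1))) W).2) := by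
    rw [cover_fabric_with_claims_alt, hmW, hmH,
      ← List.nil_append ((PySem.List.pyRange 0 H 1).map _)]
    exact PySem.List.foldl_append_singleton_eq_map _ _ _
  rw [eA, eB]
  apply List.ext_getElem
  · rw [hlenA, List.length_map, PySem.List.length_pyRange_one]; omega
  · intro n h1 h2
    apply List.ext_getElem
    · rw [hrowsA _ (List.getElem_mem h1), List.getElem_map, pv_rowScan, List.length_map,
        List.length_range]
    · intro m hm1 hm2
      have hmW' : m < W.toNat := by
        have := hrowsA _ (List.getElem_mem h1); omega
      have hWpos : 0 < W := by omega
      have hL : pvCell ((c0 :: rest).foldl pvApplyClaim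
          ((PySem.List.pyRange 0 H 1).map (fun _ => PySem.List.pyRepeat [(0 : Int)] W))) n m
          = ((c0 :: rest).foldl pvApplyClaim
          ((PySem.List.pyRange 0 H 1).map (fun _ => PySem.List.pyRepeat [(0 : Int)] W)))[n][m] := by
        rw [pvCell, List.getD_eq_getElem _ _ h1, List.getD_eq_getElem _ _ hm1]
      rw [← hL, hcellA n m, pv_cell0 H W n m]
      simp only [List.getElem_map, pv_rowScan, List.getElem_range,
        PySem.List.getElem_pyRange_one]
      have hdlen : (PySem.List.pyRepeat [(0 : Int)] (W + 1)).length = W.toNat + 1 := by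
        rw [PySem.List.pyRepeat_singleton, List.length_replicate]; omega
      rw [pv_rowDiff (c0 :: rest) (0 + (n : Int)) W.toNat _ hdlen hg2 m,
        PySem.List.pyRepeat_singleton, pv_S_zero]
      simp

theorem cover_fabric_with_claims_changed : Claim_changed_cover_fabric_with_claims := by
  unfold Claim_changed_cover_fabric_with_claims; decide
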